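-- pv_equiv track=rewrite | github.com/41775589/GRF_SUBTASK | GPT_subtask_generator/utils/misc.py | filter_traceback
-- ===== SOURCE A (Python) =====
-- def filter_traceback(s):
--     # lines = s.split('\n')
--     # filtered_lines = []
--     # for i, line in enumerate(lines):
--     #     if line.startswith('Traceback'):
--     #         for j in range(i, len(lines)):
--     #             # if "Set the environment variable HYDRA_FULL_ERROR=1" in lines[j]:
--     #             #     break
--     #             filtered_lines.append(lines[j])
--     #         return '\n'.join(filtered_lines)
--     # return ''  # Return an empty string if no Traceback is found
--     lines = s.split('\n')
--     last_traceback_index = -1  # 记录最后一个 'Traceback' 位置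
--
--     # 反向查找最后一个 'Traceback'
--     for i in range(len(lines) - 1, -1, -1):
--         if lines[i].startswith('Traceback'):
--             last_traceback_index = i
--             break  # 找到最后一个 'Traceback'，立即退出循环
--
--     # 如果找到了 Traceback，就提取它及其后续内容
--     if last_traceback_index != -1:
--         return '\n'.join(lines[last_traceback_index:])
--
--     return ''  # 没有找到 Traceback，返回空字符串
-- ===== SOURCE B (Python) =====
-- def filter_traceback(s):
--     # Backward search on the raw string: take the highest 'Traceback' occurrence
--     # that sits at a line start; no line list is built and nothing is joined.
--     upper = len(s)
--     while True:
--         idx = s.rfind('Traceback', 0, upper)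
--         if idx == -1:
--             return ''
--         if idx == 0 or s[idx - 1] == '\n':
--             return s[idx:]
--         upper = idx
-- ===== Notes on version B (the rewrite author's own statement) =====
-- stated objective: alternative
-- what changed: Instead of splitting the string into a list of lines, scanning that list backward and re-joining the tail, B searches the raw string backward with str.rfind for the last occurrence of the marker word that sits at a line start and returns the suffix from that offset with one slice.
import Mathlib
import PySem

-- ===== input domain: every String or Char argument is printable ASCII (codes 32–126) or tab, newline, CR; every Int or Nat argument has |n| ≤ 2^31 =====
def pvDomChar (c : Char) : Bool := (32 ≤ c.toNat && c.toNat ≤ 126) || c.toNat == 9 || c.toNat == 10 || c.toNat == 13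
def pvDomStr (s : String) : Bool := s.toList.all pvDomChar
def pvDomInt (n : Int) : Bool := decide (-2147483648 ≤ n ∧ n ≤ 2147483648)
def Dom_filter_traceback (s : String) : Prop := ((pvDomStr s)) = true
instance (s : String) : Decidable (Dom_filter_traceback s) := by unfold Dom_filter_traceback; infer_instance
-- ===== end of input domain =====

-- B searches the raw string backward (Python str.rfind) instead of building a line list: same value, one scan, no allocation.

-- ===== PORT A =====
-- the backward `for i in range(len(lines)-1, -1, -1): if lines[i].startswith('Traceback'): …; break` loop
def aFind (idxs : List Int) (lines : List (List Char)) : Int :=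
  match idxs with
  | [] => -1
  | i :: rest =>
    if PySem.Chars.startswith (PySem.List.pyGetD lines i []) "Traceback".toList then i
    else aFind rest lines

def filter_traceback (s : String) : String :=
  let lines := PySem.Chars.splitOn s.toList ['\n']
  let last := aFind (PySem.List.pyRange (PySem.List.len lines - 1) (-1) (-1)) lines
  if last ≠ -1 then String.ofList (PySem.Chars.join ['\n'] (PySem.List.slice lines (some last) none))
  else ""

-- ===== PORT B =====
-- hand port of Python's s.rfind('Traceback', 0, upper) (PySem has no rfind): highest start
-- position p with p + 9 ≤ min upper len where 'Traceback' occurs; -1 if none.  Exact because the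
-- 9 probed characters lie inside the window.
def bRgo (s : List Char) : Nat → Int
  | 0 => -1
  | k + 1 => if "Traceback".toList.isPrefixOf (s.drop k) then (k : Int) else bRgo s k

theorem bRgo_bounds (s : List Char) (k : Nat) (h : bRgo s k ≠ -1) :
    0 ≤ bRgo s k ∧ bRgo s k < (k : Int) := by
  induction k with
  | zero => simp [bRgo] at h
  | succ k ih =>
    by_cases hp : "Traceback".toList.isPrefixOf (s.drop k)
    · simp only [bRgo, if_pos hp]
      omega
    · simp only [bRgo, if_neg hp] at h ⊢
      rcases ih h with ⟨h1, h2⟩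
      exact ⟨h1, by omega⟩

def bRfind (s : List Char) (upper : Nat) : Int := bRgo s (min upper s.length - 8)

-- the `while True` loop of Source B
def bLoop (s : List Char) (upper : Nat) : String :=
  let idx := bRfind s upper
  if h : idx = -1 then ""
  else if idx = 0 || s.getD (idx.toNat - 1) ' ' == '\n' then
    String.ofList (PySem.List.slice s (some idx) none)
  else bLoop s idx.toNat
termination_by upper
decreasing_by
  rcases bRgo_bounds s (min upper s.length - 8) h with ⟨h1, h2⟩
  unfold bRfind
  omega

def filter_traceback_alt (s : String) : String := bLoop s.toList s.toList.length

-- ===== PRECONDITION & SPEC =====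
def Spec_filter_traceback (s : String) (out : String) : Prop := out = filter_traceback_alt s
instance (s : String) (out : String) : Decidable (Spec_filter_traceback s out) := by unfold Spec_filter_traceback; infer_instance

-- ===== CLAIM (what is proved, stated in full; the proofs are below) =====
def Claim_equal_filter_traceback : Prop := ∀ (s : String), Dom_filter_traceback s → Spec_filter_traceback s (filter_traceback s)

-- ===== LEMMAS AND PROOFS =====

-- s.split('\n') as a plain structural recursion
def Lines : List Char → List (List Char)
  | [] => [[]]
  | c :: cs =>
    if c = '\n' then [] :: Lines cs
    else match Lines cs with
      | [] => [[c]]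
      | h :: t => (c :: h) :: t

theorem Lines_ne_nil (cs : List Char) : Lines cs ≠ [] := by
  cases cs with
  | nil => simp [Lines]
  | cons c cs => simp only [Lines]; split; · simp
                 · split <;> simp

def consFirst (pre : List Char) : List (List Char) → List (List Char)
  | [] => [pre]
  | h :: t => (pre ++ h) :: t

theorem go_spec (fuel : Nat) (l cur : List Char) (acc : List (List Char)) (hf : l.length ≤ fuel) :
    PySem.Chars.splitOn.go ['\n'] fuel l cur acc = acc.reverse ++ consFirst cur.reverse (Lines l) := by
  induction fuel generalizing l cur acc with
  | zero =>
    have hl : l = [] := by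
      cases l with
      | nil => rfl
      | cons c t => simp at hf
    subst hl
    rw [PySem.Chars.splitOn.go.eq_def]
    simp [Lines, consFirst]
  | succ fuel ih =>
    cases l with
    | nil =>
      rw [PySem.Chars.splitOn.go.eq_def]
      simp [Lines, consFirst]
    | cons c rest =>
      rw [PySem.Chars.splitOn.go.eq_def]
      by_cases hc : c = '\n'
      · subst hc
        have hpre : (['\n'] : List Char).isPrefixOf ('\n' :: rest) = true := by
          simp [List.isPrefixOf]
        simp only [hpre, if_pos]
        rw [show List.drop (['\n'] : List Char).length ('\n' :: rest) = rest from rfl]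
        rw [ih rest [] (cur.reverse :: acc) (by simpa using Nat.le_of_succ_le_succ (by simpa using hf))]
        obtain ⟨h, t, hht⟩ : ∃ h t, Lines rest = h :: t := by
          cases hL : Lines rest with
          | nil => exact absurd hL (Lines_ne_nil rest)
          | cons h t => exact ⟨h, t, rfl⟩
        simp [Lines, consFirst, hht]
      · have hpre : (['\n'] : List Char).isPrefixOf (c :: rest) = false := by
          simp [List.isPrefixOf]
          intro hcc
          exact hc hcc.symm
        simp only [hpre, Bool.false_eq_true, if_false]
        rw [ih rest (c :: cur) acc (by simpa using Nat.le_of_succ_le_succ (by simpa using hf))]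
        obtain ⟨h, t, hht⟩ : ∃ h t, Lines rest = h :: t := by
          cases hL : Lines rest with
          | nil => exact absurd hL (Lines_ne_nil rest)
          | cons h t => exact ⟨h, t, rfl⟩
        simp [Lines, consFirst, hht, if_neg hc]

theorem splitOn_eq_Lines (cs : List Char) : PySem.Chars.splitOn cs ['\n'] = Lines cs := by
  rw [PySem.Chars.splitOn, go_spec (cs.length + 1) cs [] [] (by omega)]
  obtain ⟨h, t, hht⟩ : ∃ h t, Lines cs = h :: t := by
    cases hL : Lines cs with
    | nil => exact absurd hL (Lines_ne_nil cs)
    | cons h t => exact ⟨h, t, rfl⟩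
  simp [consFirst, hht]

-- last index in the list satisfying q
def lastIdxP (q : List Char → Bool) : List (List Char) → Option Nat
  | [] => none
  | x :: t =>
    match lastIdxP q t with
    | some j => some (j + 1)
    | none => if q x then some 0 else none

def pA (l : List Char) : Bool := PySem.Chars.startswith l "Traceback".toList

-- occurrence / accepted line-start occurrence at position p
def occB (s : List Char) (p : Nat) : Bool := "Traceback".toList.isPrefixOf (s.drop p)
def goodB (s : List Char) (p : Nat) : Bool :=
  (p == 0 || s.getD (p - 1) ' ' == '\n') && occB s p

-- greatest p < k with f p
def maxBelow (f : Nat → Bool) : Nat → Option Nat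
  | 0 => none
  | k + 1 => if f k then some k else maxBelow f k

theorem maxBelow_eq_some_iff (f : Nat → Bool) (k p : Nat) :
    maxBelow f k = some p ↔ p < k ∧ f p = true ∧ ∀ q, p < q → q < k → f q = false := by
  induction k with
  | zero => simp [maxBelow]
  | succ k ih =>
    simp only [maxBelow]
    by_cases hf : f k = true
    · rw [if_pos hf]
      constructor
      · rintro h
        injection h with h
        subst h
        exact ⟨Nat.lt_succ_self _, hf, fun q h1 h2 => by omega⟩
      · rintro ⟨h1, h2, h3⟩
        have hpk : p = k := by
          by_contra hne
          have := h3 k (by omega) (Nat.lt_succ_self _)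
          simp [hf] at this
        subst hpk; rfl
    · rw [if_neg hf, ih]
      constructor
      · rintro ⟨h1, h2, h3⟩
        refine ⟨by omega, h2, fun q hq1 hq2 => ?_⟩
        by_cases hqk : q = k
        · subst hqk; simpa using hf
        · exact h3 q hq1 (by omega)
      · rintro ⟨h1, h2, h3⟩
        have hpk : p ≠ k := by rintro rfl; exact hf h2
        exact ⟨by omega, h2, fun q hq1 hq2 => h3 q hq1 (by omega)⟩

theorem maxBelow_eq_none_iff (f : Nat → Bool) (k : Nat) :
    maxBelow f k = none ↔ ∀ p, p < k → f p = false := by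
  induction k with
  | zero => simp [maxBelow]
  | succ k ih =>
    simp only [maxBelow]
    by_cases hf : f k = true
    · rw [if_pos hf]
      constructor
      · rintro ⟨⟩
      · intro h
        have := h k (Nat.lt_succ_self _)
        simp [hf] at this
    · rw [if_neg hf, ih]
      constructor
      · intro h q hq
        by_cases hqk : q = k
        · subst hqk; simpa using hf
        · exact h q (by omega)
      · intro h p hp
        exact h p (by omega)

theorem occB_bound (s : List Char) (p : Nat) (h : occB s p = true) : p + 9 ≤ s.length := by
  have h1 : ("Traceback".toList).length ≤ (s.drop p).length :=
    (List.isPrefixOf_iff_prefix.mp h).length_le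
  have h2 : ("Traceback".toList).length = 9 := by decide
  rw [h2, List.length_drop] at h1
  omega

theorem occB_no_overlap (s : List Char) (p q : Nat) (hp : occB s p = true) (hq : occB s q = true)
    (h1 : p < q) (h2 : q < p + 9) : False := by
  unfold occB at hp hq
  rw [List.isPrefixOf_iff_prefix] at hp hq
  obtain ⟨rest, hrest⟩ := hp
  have hd : s.drop q = ("Traceback".toList).drop (q - p) ++ rest := by
    have hqq : s.drop q = (s.drop p).drop (q - p) := by
      rw [List.drop_drop]; congr 1; omega
    rw [hqq, ← hrest, List.drop_append_of_le_length (by simp; omega)]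
  rw [hd] at hq
  have hlen : (("Traceback".toList).drop (q - p)).length ≤ ("Traceback".toList).length := by
    simp
  have hpre : ("Traceback".toList).drop (q - p) <+: "Traceback".toList :=
    List.prefix_of_prefix_length_le (List.prefix_append _ _) hq hlen
  have hno : ∀ d < 9, 0 < d → ¬ (("Traceback".toList).drop d <+: "Traceback".toList) := by
    decide
  exact hno (q - p) (by omega) (by omega) hpre

theorem bRgo_char (s : List Char) (k : Nat) :
    bRgo s k = match maxBelow (occB s) k with | some p => (p : Int) | none => -1 := by
  induction k with
  | zero => rfl
  | succ k ih =>
    by_cases h : (['T','r','a','c','e','b','a','c','k'] : List Char) <+: s.drop k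
    · simp [bRgo, maxBelow, occB, h]
    · simp [bRgo, maxBelow, occB, h, ih]

theorem goodB_occB {s : List Char} {q : Nat} (h : goodB s q = true) : occB s q = true := by
  simp [goodB] at h
  exact h.2

theorem bLoop_char (s : List Char) (upper : Nat) (hle : upper ≤ s.length)
    (hinv : ∀ p, occB s p = true → p < upper → p + 9 ≤ upper)
    (hgood : ∀ q, upper ≤ q → goodB s q = false) :
    bLoop s upper =
      match maxBelow (goodB s) s.length with
      | some p => String.ofList (s.drop p)
      | none => "" := by
  induction upper using Nat.strong_induction_on with
  | _ upper ih =>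
  have hmin : min upper s.length = upper := by omega
  rw [bLoop]
  rcases hmax : maxBelow (occB s) (min upper s.length - 8) with _ | p0
  · have hidx : bRfind s upper = -1 := by rw [bRfind, bRgo_char, hmax]
    rw [dif_pos hidx]
    have hnone : maxBelow (goodB s) s.length = none := by
      rw [maxBelow_eq_none_iff]
      intro p hp
      by_cases hpu : p < upper
      · by_contra hgp
        have hgp : goodB s p = true := by simpa using hgp
        have hocc := goodB_occB hgp
        have h9 := hinv p hocc hpu
        have : occB s p = false := by
          have := maxBelow_eq_none_iff (occB s) (min upper s.length - 8) |>.mp hmax p (by omega)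
          exact this
        simp [hocc] at this
      · exact hgood p (by omega)
    rw [hnone]
  · obtain ⟨hp0lt, hp0occ, hp0max⟩ := (maxBelow_eq_some_iff (occB s) _ p0).mp hmax
    have hidx : bRfind s upper = (p0 : Int) := by rw [bRfind, bRgo_char, hmax]
    have hidxne : ¬ (bRfind s upper = -1) := by rw [hidx]; omega
    rw [dif_neg hidxne, hidx]
    have hnoOccAbove : ∀ q, p0 < q → q < upper → occB s q = false := by
      intro q hq1 hq2
      by_cases hq3 : q < min upper s.length - 8
      · exact hp0max q hq1 hq3
      · by_contra hocq
        have hocq : occB s q = true := by simpa using hocq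
        have := hinv q hocq hq2
        omega
    have hp09 : p0 + 9 ≤ upper := by omega
    have hp0len : p0 + 9 ≤ s.length := occB_bound s p0 hp0occ
    have htoNat : ((p0 : Int)).toNat = p0 := by omega
    by_cases hline : goodB s p0 = true
    · have hcond : (((p0 : Int) = 0 : Bool) || s.getD (((p0 : Int)).toNat - 1) ' ' == '\n') = true := by
        simp only [goodB, Bool.and_eq_true] at hline
        rcases hline with ⟨hl, _⟩
        rw [htoNat]
        simp only [Bool.or_eq_true] at hl ⊢
        rcases hl with hl | hl
        · left; simp at hl; simp [hl]
        · right; exact hl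
      rw [if_pos hcond]
      have hsome : maxBelow (goodB s) s.length = some p0 := by
        rw [maxBelow_eq_some_iff]
        refine ⟨by omega, hline, fun q hq1 hq2 => ?_⟩
        by_cases hqu : q < upper
        · by_contra hgq
          have hgq : goodB s q = true := by simpa using hgq
          have := hnoOccAbove q hq1 hqu
          simp [goodB_occB hgq] at this
        · exact hgood q (by omega)
      rw [hsome, PySem.List.slice_from_natCast]
    · have hcond : ¬ ((((p0 : Int) = 0 : Bool) || s.getD (((p0 : Int)).toNat - 1) ' ' == '\n') = true) := by
        intro hc
        apply hline
        simp only [goodB, Bool.and_eq_true]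
        refine ⟨?_, hp0occ⟩
        rw [htoNat] at hc
        simp only [Bool.or_eq_true] at hc ⊢
        rcases hc with hc | hc
        · left; simp at hc; simp [hc]
        · right; exact hc
      rw [if_neg hcond, htoNat]
      rw [ih p0 (by omega) (by omega)
        (fun p hocc hplt => by
          by_contra h9
          exact occB_no_overlap s p p0 hocc hp0occ hplt (by omega))
        (fun q hq => by
          by_cases hq0 : q = p0
          · subst hq0; simpa using hline
          · by_cases hqu : q < upper
            · by_contra hgq
              have hgq : goodB s q = true := by simpa using hgq
              have := hnoOccAbove q (by omega) hqu
              simp [goodB_occB hgq] at this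
            · exact hgood q (by omega))]

-- A-side characterisation
theorem pyRange_down_cons (k : Nat) :
    PySem.List.pyRange (k : Int) (-1) (-1) = (k : Int) :: PySem.List.pyRange ((k : Int) - 1) (-1) (-1) := by
  cases k with
  | zero => decide
  | succ n =>
    simp only [PySem.List.pyRange]
    norm_num
    rw [if_pos (show (-1:Int) < (n:Int) by omega),
        show ((n:Int) + 1 + 1).toNat = (n + 1) + 1 by omega,
        List.range_succ_eq_map, List.map_cons, List.map_map]
    norm_num

theorem lastIdxP_append_singleton (q : List Char → Bool) (xs : List (List Char)) (x : List Char) :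
    lastIdxP q (xs ++ [x]) = if q x then some xs.length else lastIdxP q xs := by
  induction xs with
  | nil => by_cases h : q x <;> simp [lastIdxP, h]
  | cons y xs ih =>
    by_cases h : q x
    · simp [lastIdxP, ih, h]
    · simp only [List.cons_append, lastIdxP, ih, if_neg h]

theorem aFind_char (lines : List (List Char)) (k : Nat) (hk : k ≤ lines.length) :
    aFind (PySem.List.pyRange ((k : Int) - 1) (-1) (-1)) lines =
      match lastIdxP pA (lines.take k) with | some j => (j : Int) | none => -1 := by
  induction k with
  | zero =>
    have h0 : PySem.List.pyRange (((0:Nat):Int) - 1) (-1) (-1) = ([] : List Int) := by decide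
    rw [h0]
    simp [aFind, lastIdxP]
  | succ k ih =>
    have hk' : k < lines.length := by omega
    have hcast : ((k + 1 : Nat) : Int) - 1 = (k : Int) := by push_cast; ring
    rw [hcast, pyRange_down_cons]
    have hget : PySem.List.pyGetD lines (k : Int) [] = lines[k] := by
      simp [PySem.List.pyGetD_natCast, List.getD_eq_getElem?_getD, List.getElem?_eq_getElem hk']
    have htake : lines.take (k + 1) = lines.take k ++ [lines[k]] := by
      rw [List.take_add_one, List.getElem?_eq_getElem hk']
      rfl
    simp only [aFind, hget, htake, lastIdxP_append_singleton]
    by_cases h : PySem.Chars.startswith lines[k] "Traceback".toList = true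
    · have hlen : (lines.take k).length = k := by simp; omega
      rw [if_pos h, if_pos (show pA lines[k] = true from h), hlen]
    · rw [if_neg h, if_neg (show ¬ pA lines[k] = true from h), ih (by omega)]

-- structure of Lines
theorem Lines_no_newline (cs : List Char) (h : '\n' ∉ cs) : Lines cs = [cs] := by
  induction cs with
  | nil => rfl
  | cons c cs ih =>
    have hc : c ≠ '\n' := fun hc => h (by simp [hc])
    have ht : '\n' ∉ cs := fun hm => h (by simp [hm])
    simp only [Lines, if_neg hc, ih ht]

theorem Lines_append_newline (l r : List Char) (h : '\n' ∉ l) :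
    Lines (l ++ '\n' :: r) = l :: Lines r := by
  induction l with
  | nil => simp [Lines]
  | cons c l ih =>
    have hc : c ≠ '\n' := fun hc => h (by simp [hc])
    have ht : '\n' ∉ l := fun hm => h (by simp [hm])
    simp only [List.cons_append, Lines, if_neg hc, ih ht]

theorem join_Lines (cs : List Char) : PySem.Chars.join ['\n'] (Lines cs) = cs := by
  induction cs with
  | nil => simp [Lines, PySem.Chars.join_singleton]
  | cons c cs ih =>
    by_cases hc : c = '\n'
    · subst hc
      obtain ⟨h, t, hht⟩ : ∃ h t, Lines cs = h :: t := by
        cases hL : Lines cs with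
        | nil => exact absurd hL (Lines_ne_nil cs)
        | cons h t => exact ⟨h, t, rfl⟩
      rw [show Lines ('\n' :: cs) = [] :: Lines cs from by simp [Lines], hht,
        PySem.Chars.join_cons_cons, ← hht, ih]
      rfl
    · simp only [Lines, if_neg hc]
      cases hL : Lines cs with
      | nil => exact absurd hL (Lines_ne_nil cs)
      | cons h t =>
        cases t with
        | nil =>
          rw [PySem.Chars.join_singleton]
          rw [hL, PySem.Chars.join_singleton] at ih
          rw [ih]
        | cons q t' =>
          rw [PySem.Chars.join_cons_cons]
          rw [hL, PySem.Chars.join_cons_cons] at ih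
          rw [← ih]
          simp

theorem prefix_append_newline (t l r : List Char) (h : '\n' ∉ t) :
    t.isPrefixOf (l ++ '\n' :: r) = t.isPrefixOf l := by
  induction t generalizing l with
  | nil => simp
  | cons a t ih =>
    have ha : a ≠ '\n' := fun hc => h (by simp [hc])
    have ht : '\n' ∉ t := fun hm => h (by simp [hm])
    cases l with
    | nil =>
      simp only [List.nil_append, List.isPrefixOf]
      simp [ha]
    | cons b l =>
      simp only [List.cons_append, List.isPrefixOf, ih l ht]

-- position/line-index bridge lemmas
theorem tb_no_newline : '\n' ∉ "Traceback".toList := by decide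

theorem goodB_zero (s : List Char) : goodB s 0 = occB s 0 := by simp [goodB]

theorem occB_zero_pA (s : List Char) : occB s 0 = pA s := by
  simp [occB, pA, PySem.Chars.startswith]

theorem occB_shift (l r : List Char) (m : Nat) :
    occB (l ++ '\n' :: r) (l.length + 1 + m) = occB r m := by
  simp only [occB]
  congr 1
  rw [show l.length + 1 + m = l.length + (1 + m) by omega, List.drop_length_add_append,
    show 1 + m = m + 1 by omega, List.drop_succ_cons]

theorem gmid (l r : List Char) (hl : '\n' ∉ l) (p : Nat) (h1 : 1 ≤ p) (h2 : p ≤ l.length) :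
    goodB (l ++ '\n' :: r) p = false := by
  simp only [goodB]
  have hp0 : (p == 0) = false := by simp; omega
  have hlt : p - 1 < l.length := by omega
  have hchar : ((l ++ '\n' :: r).getD (p - 1) ' ' == '\n') = false := by
    rw [List.getD_append l ('\n' :: r) ' ' (p - 1) hlt, List.getD_eq_getElem l ' ' hlt]
    have hm : l[p - 1] ∈ l := List.getElem_mem _
    have : l[p - 1] ≠ '\n' := fun hc => hl (hc ▸ hm)
    simpa using this
  rw [hp0, hchar]
  rfl

theorem gshift (l r : List Char) (m : Nat) :
    goodB (l ++ '\n' :: r) (l.length + 1 + m) = goodB r m := by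
  simp only [goodB, occB_shift]
  congr 1
  cases m with
  | zero =>
    have hc : (l ++ '\n' :: r).getD (l.length + 1 + 0 - 1) ' ' = '\n' := by
      rw [show l.length + 1 + 0 - 1 = l.length by omega,
        List.getD_append_right l ('\n' :: r) ' ' l.length (le_refl _)]
      simp
    simp [hc]
  | succ m =>
    have hc : (l ++ '\n' :: r).getD (l.length + 1 + (m + 1) - 1) ' ' = r.getD m ' ' := by
      rw [show l.length + 1 + (m + 1) - 1 = l.length + (m + 1) by omega,
        List.getD_append_right l ('\n' :: r) ' ' _ (by omega),
        show l.length + (m + 1) - l.length = m + 1 by omega]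
      simp
    rw [hc]
    simp

theorem maxBelow_good_append (l r : List Char) (hl : '\n' ∉ l) :
    maxBelow (goodB (l ++ '\n' :: r)) (l ++ '\n' :: r).length =
      match maxBelow (goodB r) r.length with
      | some m => some (l.length + 1 + m)
      | none => if occB (l ++ '\n' :: r) 0 = true then some 0 else none := by
  have hlen : (l ++ '\n' :: r).length = l.length + 1 + r.length := by simp; omega
  cases h2 : maxBelow (goodB r) r.length with
  | some m =>
    obtain ⟨hm1, hm2, hm3⟩ := (maxBelow_eq_some_iff _ _ _).mp h2
    rw [maxBelow_eq_some_iff]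
    refine ⟨by omega, by rw [gshift l r m]; exact hm2, ?_⟩
    intro q hq1 hq2
    have hq3 : l.length + 1 ≤ q := by omega
    have hq4 : q = l.length + 1 + (q - (l.length + 1)) := by omega
    rw [hq4, gshift]
    by_cases hm'r : q - (l.length + 1) < r.length
    · exact hm3 _ (by omega) hm'r
    · by_contra hg
      have hg : goodB r (q - (l.length + 1)) = true := by simpa using hg
      have := occB_bound r _ (goodB_occB hg)
      omega
  | none =>
    have hnone : ∀ m, goodB r m = false := by
      intro m
      by_cases hmr : m < r.length
      · exact (maxBelow_eq_none_iff _ _).mp h2 m hmr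
      · by_contra hg
        have hg : goodB r m = true := by simpa using hg
        have := occB_bound r m (goodB_occB hg)
        omega
    by_cases hocc : occB (l ++ '\n' :: r) 0 = true
    · rw [if_pos hocc, maxBelow_eq_some_iff]
      refine ⟨by omega, by rw [goodB_zero]; exact hocc, ?_⟩
      intro q hq1 hq2
      by_cases hql : q ≤ l.length
      · exact gmid l r hl q (by omega) hql
      · rw [show q = l.length + 1 + (q - (l.length + 1)) by omega, gshift]
        exact hnone _
    · rw [if_neg hocc, maxBelow_eq_none_iff]
      intro q hq
      by_cases hq0 : q = 0
      · subst hq0; rw [goodB_zero]; simpa using hocc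
      · by_cases hql : q ≤ l.length
        · exact gmid l r hl q (by omega) hql
        · rw [show q = l.length + 1 + (q - (l.length + 1)) by omega, gshift]
          exact hnone _

theorem maxBelow_good_no_newline (s : List Char) (h : '\n' ∉ s) :
    maxBelow (goodB s) s.length = if occB s 0 = true then some 0 else none := by
  have hpos : ∀ p, 1 ≤ p → goodB s p = false := by
    intro p hp
    simp only [goodB]
    have hp0 : (p == 0) = false := by simp; omega
    have hchar : (s.getD (p - 1) ' ' == '\n') = false := by
      by_cases hlt : p - 1 < s.length
      · rw [List.getD_eq_getElem s ' ' hlt]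
        have hm : s[p - 1] ∈ s := List.getElem_mem _
        have : s[p - 1] ≠ '\n' := fun hc => h (hc ▸ hm)
        simpa using this
      · rw [List.getD_eq_default s ' ' (by omega)]
        decide
    rw [hp0, hchar]
    rfl
  by_cases hocc : occB s 0 = true
  · rw [if_pos hocc, maxBelow_eq_some_iff]
    have h9 := occB_bound s 0 hocc
    exact ⟨by omega, by rw [goodB_zero]; exact hocc, fun q hq1 _ => hpos q (by omega)⟩
  · rw [if_neg hocc, maxBelow_eq_none_iff]
    intro p hp
    by_cases hp0 : p = 0
    · subst hp0; rw [goodB_zero]; simpa using hocc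
    · exact hpos p (by omega)

theorem split_first_newline (cs : List Char) (h : '\n' ∈ cs) :
    ∃ l r, cs = l ++ '\n' :: r ∧ '\n' ∉ l := by
  induction cs with
  | nil => simp at h
  | cons c cs ih =>
    by_cases hc : c = '\n'
    · exact ⟨[], cs, by simp [hc], by simp⟩
    · have hm : '\n' ∈ cs := by
        rcases List.mem_cons.mp h with h' | h'
        · exact absurd h'.symm hc
        · exact h'
      obtain ⟨l, r, hcs, hl⟩ := ih hm
      exact ⟨c :: l, r, by rw [hcs]; rfl, by
        intro hmem
        rcases List.mem_cons.mp hmem with h' | h'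
        · exact hc h'.symm
        · exact hl h'⟩

-- the bridge: A's (line index ↦ joined tail) equals B's (position ↦ suffix)
theorem grand (cs : List Char) :
    (lastIdxP pA (Lines cs)).map (fun j => PySem.Chars.join ['\n'] ((Lines cs).drop j)) =
      (maxBelow (goodB cs) cs.length).map (fun p => cs.drop p) := by
  induction hcs : cs.length using Nat.strong_induction_on generalizing cs with
  | _ n ih =>
  subst hcs
  by_cases hmem : '\n' ∈ cs
  · obtain ⟨l, r, rfl, hl⟩ := split_first_newline cs hmem
    have IH := ih r.length (by simp; omega) r rfl
    rw [Lines_append_newline l r hl, maxBelow_good_append l r hl]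
    cases h1 : lastIdxP pA (Lines r) with
    | some j =>
      cases h2 : maxBelow (goodB r) r.length with
      | some m =>
        rw [h1, h2] at IH
        simp only [Option.map_some] at IH
        injection IH with IH
        simp only [lastIdxP, h1, Option.map_some, List.drop_succ_cons]
        rw [IH]
        congr 1
        rw [show l.length + 1 + m = l.length + (1 + m) by omega, List.drop_length_add_append,
          show 1 + m = m + 1 by omega, List.drop_succ_cons]
      | none => rw [h1, h2] at IH; simp at IH
    | none =>
      cases h2 : maxBelow (goodB r) r.length with
      | some m => rw [h1, h2] at IH; simp at IH
      | none =>
        have hocc0 : occB (l ++ '\n' :: r) 0 = pA l := by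
          rw [occB_zero_pA]
          simp only [pA, PySem.Chars.startswith]
          exact prefix_append_newline _ l r tb_no_newline
        simp only [lastIdxP, h1, hocc0]
        by_cases hpa : pA l = true
        · rw [if_pos hpa]
          simp only [Option.map_some, List.drop_zero]
          congr 1
          rw [← Lines_append_newline l r hl, join_Lines]
        · rw [if_neg hpa]
          rfl
  · rw [Lines_no_newline cs hmem, maxBelow_good_no_newline cs hmem, occB_zero_pA]
    simp only [lastIdxP]
    by_cases hpa : pA cs = true
    · rw [if_pos hpa]
      simp [PySem.Chars.join_singleton]
    · rw [if_neg hpa]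
      rfl

-- ===== VERDICT (by name: the statement is the Claim_ definition above) =====
theorem filter_traceback_spec : Claim_equal_filter_traceback := by
  intro s _
  unfold Spec_filter_traceback filter_traceback filter_traceback_alt
  simp only [splitOn_eq_Lines, PySem.List.len_eq]
  rw [aFind_char (Lines s.toList) (Lines s.toList).length (le_refl _), List.take_length]
  have hB := bLoop_char s.toList s.toList.length (le_refl _)
    (fun p hocc _ => occB_bound s.toList p hocc)
    (fun q hq => by
      by_contra hg
      have hg : goodB s.toList q = true := by simpa using hg
      have := occB_bound s.toList q (goodB_occB hg)
      omega)
  rw [hB]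
  have hG := grand s.toList
  cases h1 : lastIdxP pA (Lines s.toList) with
  | none =>
    cases h2 : maxBelow (goodB s.toList) s.toList.length with
    | none => simp only [h1]; simp
    | some m => rw [h1, h2] at hG; simp at hG
  | some j =>
    cases h2 : maxBelow (goodB s.toList) s.toList.length with
    | none => rw [h1, h2] at hG; simp at hG
    | some m =>
      rw [h1, h2] at hG
      simp only [Option.map_some] at hG
      injection hG with hG
      simp only [h1]
      rw [if_pos (show ((j : Int) ≠ -1) by omega), PySem.List.slice_from_natCast, hG]
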